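-- pv_equiv track=rewrite | github.com/vishank01/DSA-Practice | microsoft/1_character_transform.py | character_transform
-- ===== SOURCE A (Python) =====
-- def character_transform(n:int)->str:
--     """generate string by combining two alphabets to the next coming alphabet until we reach Z
--         e.g, n=5 means AAAAA -> BBA -> CA
--     Args:
--         n (int): number of A's present in a string
--
--     Returns:
--         str: [description]
--
--     >>> character_transform(67108876)
--     'ZZDC'
--     >>> character_transform(19)
--     'EBA'
--     >>> character_transform(11)
--     'DBA'
--     >>> character_transform(8)
--     'D'
--     """
--     op = []
--     chr_val = 65
--     while(n>0):
--         if chr_val<90: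
--             #check if number is odd and store last character value in output
--             if n%2!=0:
--                 op.append(chr(chr_val))
--             #increment char value (e.g, from A to B while doing right shift)
--             chr_val+=1
--         else:
--             op.append(chr(chr_val))
--         #right shift divides data by 2
--         n=n>>1
--     return "".join(op[::-1])
-- ===== SOURCE B (Python) =====
-- def character_transform(n: int) -> str:
--     if n <= 0:
--         return ""
--     bits = bin(n)[2:]
--     zs = max(len(bits) - 25, 0)
--     tail = bits[zs:]
--     return "Z" * zs + "".join(chr(64 + len(tail) - i)
--                               for i, ch in enumerate(tail) if ch == '1')
-- ===== Notes on version B (the rewrite author's own statement) =====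
-- stated objective: alternative
-- what changed: B drops A's bit-by-bit halving loop with its running chr_val accumulator, conditional appends and final list reversal, and instead builds the answer in closed form from the binary string bin(n): a string-repetition 'Z'*(len-25) for the high bits, then a slice of the low 25 binary digits whose '1' characters are mapped straight to letters by index arithmetic.
import Mathlib
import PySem

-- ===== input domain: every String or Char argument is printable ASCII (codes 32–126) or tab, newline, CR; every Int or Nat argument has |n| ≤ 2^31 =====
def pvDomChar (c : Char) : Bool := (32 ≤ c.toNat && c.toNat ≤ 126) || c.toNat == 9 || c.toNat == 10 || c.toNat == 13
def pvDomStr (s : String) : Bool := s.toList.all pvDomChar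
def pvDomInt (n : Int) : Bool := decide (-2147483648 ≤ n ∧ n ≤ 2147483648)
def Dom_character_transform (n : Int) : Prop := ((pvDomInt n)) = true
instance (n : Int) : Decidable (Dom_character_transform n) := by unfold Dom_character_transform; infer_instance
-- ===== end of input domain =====

-- B replaces A's halving loop (running chr_val, list built LSB-first then reversed) by a closed-form
-- staged build from the binary string of n: 'Z' repetition for the high bits, then the low-25-digit
-- slice mapped to letters by index arithmetic; same return value.

-- termination fact for the halving loops (cited by decreasing_by)
theorem pv_fd_lt (n : Int) (h : 0 < n) : (PySem.Int.floordiv n 2).toNat < n.toNat := by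
  rw [PySem.Int.floordiv_eq_ediv_of_pos (by omega : (0:Int) < 2)]
  omega

-- ===== PORT A =====
-- while(n>0): …  (Python's 'n >> 1' on an int is floor division by 2: floordiv n 2)
def ctLoop (n : Int) (chrVal : Int) (op : List Char) : List Char :=
  if 0 < n then
    if chrVal < 90 then
      ctLoop (PySem.Int.floordiv n 2) (chrVal + 1)
        (if PySem.Int.mod n 2 ≠ 0 then op ++ [Char.ofNat chrVal.toNat] else op)
    else
      ctLoop (PySem.Int.floordiv n 2) chrVal (op ++ [Char.ofNat chrVal.toNat])
  else op
termination_by n.toNat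
decreasing_by all_goals exact pv_fd_lt n (by assumption)

-- "".join(op[::-1])
def character_transform (n : Int) : String := String.mk ((ctLoop n 65 []).reverse)

-- ===== PORT B =====
-- bin(m)[2:] for m > 0: MSB-first binary digits (hand port of the library call; exact for m > 0,
-- and [] at m = 0, which B only reaches behind its n ≤ 0 guard... n > 0 ⇒ m > 0)
def pyBin (m : Nat) : List Char :=
  if h : m = 0 then [] else pyBin (m / 2) ++ [if m % 2 = 1 then '1' else '0']
termination_by m
decreasing_by exact Nat.div_lt_self (Nat.pos_of_ne_zero h) (by omega)

-- if n <= 0: ""; zs = max(len(bits)-25, 0); tail = bits[zs:]; "Z"*zs + join(comprehension)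
def character_transform_alt (n : Int) : String :=
  if n ≤ 0 then "" else
    let bits := pyBin n.toNat
    let zs : Int := max ((bits.length : Int) - 25) 0
    let tail := PySem.List.slice bits (some zs) none
    String.mk (PySem.List.pyRepeat ['Z'] zs ++
      (PySem.List.enumerate tail 0).filterMap (fun p =>
        if p.2 = '1' then some (Char.ofNat (64 + (tail.length : Int) - p.1).toNat) else none))

-- ===== PRECONDITION & SPEC =====
def Spec_character_transform (n : Int) (out : String) : Prop := out = character_transform_alt n
instance (n : Int) (out : String) : Decidable (Spec_character_transform n out) := by unfold Spec_character_transform; infer_instance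

-- ===== CLAIM =====
def Claim_equal_character_transform : Prop := ∀ (n : Int), Dom_character_transform n → Spec_character_transform n (character_transform n)

-- ===== LEMMAS AND PROOFS =====

-- the character A emits at depth k (chr_val = 65 + min k 25)
def entryF (n : Int) (k : Nat) : List Char :=
  if 25 ≤ k then ['Z'] else if PySem.Int.mod n 2 ≠ 0 then [Char.ofNat (65 + k)] else []

-- A's emitted characters in MSB-first order (reverse of emission order)
def blist (n : Int) (k : Nat) : List Char :=
  if 0 < n then blist (PySem.Int.floordiv n 2) (k + 1) ++ entryF n k else []
termination_by n.toNat
decreasing_by exact pv_fd_lt n (by assumption)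

theorem entryF_reverse (n : Int) (k : Nat) : (entryF n k).reverse = entryF n k := by
  unfold entryF; split_ifs <;> simp

theorem ctLoop_eq_blist (m : Nat) : ∀ (n : Int), n.toNat ≤ m → ∀ (k : Nat) (op : List Char),
    ctLoop n (65 + (min k 25 : Nat)) op = op ++ (blist n k).reverse := by
  induction m with
  | zero =>
    intro n hn k op
    rw [ctLoop, blist]
    have h0 : ¬ (0 < n) := by omega
    simp [h0]
  | succ m ih =>
    intro n hn k op
    rw [ctLoop, blist]
    by_cases hp : 0 < n
    · have hlt := pv_fd_lt n hp
      simp only [hp, if_true]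
      by_cases hk : k < 25
      · have hc : (65 + (min k 25 : Nat) : Int) < 90 := by omega
        simp only [hc, if_true]
        have h1 : (65 + (min k 25 : Nat) : Int) + 1 = 65 + (min (k+1) 25 : Nat) := by
          have h2 : min k 25 = k := by omega
          have h3 : min (k+1) 25 = k+1 := by omega
          rw [h2, h3]; push_cast; ring
        have h4 : ((65 + (min k 25 : Nat) : Int)).toNat = 65 + k := by
          have h2 : min k 25 = k := by omega
          rw [h2]; omega
        rw [h1, ih (PySem.Int.floordiv n 2) (Nat.le_of_lt_succ (Nat.lt_of_lt_of_le hlt hn)) (k+1)]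
        rw [List.reverse_append, entryF_reverse]
        unfold entryF
        have hk' : ¬ (25 ≤ k) := by omega
        simp only [hk', if_false, h4]
        split_ifs <;> simp
      · have hc : ¬ ((65 + (min k 25 : Nat) : Int) < 90) := by omega
        simp only [hc, if_false]
        have h1 : (65 + (min k 25 : Nat) : Int) = 65 + (min (k+1) 25 : Nat) := by
          have h2 : min k 25 = 25 := by omega
          have h3 : min (k+1) 25 = 25 := by omega
          rw [h2, h3]
        have h4 : ((65 + (min k 25 : Nat) : Int)).toNat = 90 := by
          have h2 : min k 25 = 25 := by omega
          rw [h2]; omega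
        rw [h1, ih (PySem.Int.floordiv n 2) (Nat.le_of_lt_succ (Nat.lt_of_lt_of_le hlt hn)) (k+1)]
        rw [List.reverse_append, entryF_reverse]
        unfold entryF
        have hk' : (25 ≤ k) := by omega
        have hz : Char.ofNat ((65 + (min (k+1) 25 : Nat) : Int)).toNat = 'Z' := by
          have h5 : min (k+1) 25 = 25 := by omega
          rw [h5]; decide
        simp only [hk', if_true, hz]
        simp
    · rw [if_neg hp, if_neg hp]
      rw [List.reverse_nil, List.append_nil]

theorem fd_nonneg (n : Int) (h : 0 < n) : 0 ≤ PySem.Int.floordiv n 2 := by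
  rw [PySem.Int.floordiv_eq_ediv_of_pos (by omega : (0:Int) < 2)]
  omega

theorem fd_toNat (n : Int) (h : 0 < n) : (PySem.Int.floordiv n 2).toNat = n.toNat / 2 := by
  rw [PySem.Int.floordiv_eq_ediv_of_pos (by omega : (0:Int) < 2)]
  omega

theorem mod_digit (n : Int) (h : 0 < n) : (PySem.Int.mod n 2 ≠ 0) ↔ (n.toNat % 2 = 1) := by
  rw [PySem.Int.mod_eq_emod_of_pos (by omega : (0:Int) < 2)]
  omega

-- B's letter comprehension, read off the t low bits of n, positions offset by k
def lettT : Int → Nat → Nat → List Char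
  | _, 0, _ => []
  | n, t+1, k => lettT (PySem.Int.floordiv n 2) t (k+1) ++
      (if PySem.Int.mod n 2 ≠ 0 then [Char.ofNat (65 + k)] else [])

-- the t low binary digits of n, MSB-first, zero-padded to length t
def padBin : Int → Nat → List Char
  | _, 0 => []
  | n, t+1 => padBin (PySem.Int.floordiv n 2) t ++ [if PySem.Int.mod n 2 ≠ 0 then '1' else '0']

theorem length_padBin (t : Nat) : ∀ (n : Int), (padBin n t).length = t := by
  induction t with
  | zero => intro n; rfl
  | succ t ih => intro n; simp [padBin, ih]

theorem pyBin_succ (n : Int) (h : 0 < n) :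
    pyBin n.toNat = pyBin ((PySem.Int.floordiv n 2).toNat) ++
      [if PySem.Int.mod n 2 ≠ 0 then '1' else '0'] := by
  conv_lhs => rw [pyBin]
  rw [dif_neg (by omega : ¬ n.toNat = 0), fd_toNat n h]
  congr 1
  by_cases hm : n.toNat % 2 = 1
  · rw [if_pos hm, if_pos ((mod_digit n h).mpr hm)]
  · rw [if_neg hm, if_neg (fun hc => hm ((mod_digit n h).mp hc))]

theorem drop_pyBin (t : Nat) : ∀ (n : Int), 0 ≤ n → t ≤ (pyBin n.toNat).length →
    (pyBin n.toNat).drop ((pyBin n.toNat).length - t) = padBin n t := by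
  induction t with
  | zero => intro n _ _; simp [padBin]
  | succ t ih =>
    intro n hn ht
    have hp : 0 < n := by
      rcases lt_or_eq_of_le hn with h | h
      · exact h
      · exfalso; rw [← h] at ht; rw [show (0:Int).toNat = 0 from rfl, pyBin] at ht; simp at ht
    rw [pyBin_succ n hp] at ht ⊢
    rw [List.length_append] at ht ⊢
    simp only [List.length_cons, List.length_nil] at ht ⊢
    have hlen : t ≤ (pyBin (PySem.Int.floordiv n 2).toNat).length := by omega
    have hk : (pyBin (PySem.Int.floordiv n 2).toNat).length + (0 + 1) - (t+1)
        = (pyBin (PySem.Int.floordiv n 2).toNat).length - t := by omega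
    rw [hk, List.drop_append_of_le_length (by omega)]
    rw [ih (PySem.Int.floordiv n 2) (fd_nonneg n hp) hlen]
    rfl

theorem filterMap_padBin (t : Nat) : ∀ (n : Int) (k : Nat),
    (PySem.List.enumerate (padBin n t) 0).filterMap (fun p =>
        if p.2 = '1' then some (Char.ofNat ((64 + (t:Int) + (k:Int)) - p.1).toNat) else none)
      = lettT n t k := by
  induction t with
  | zero => intro n k; simp [padBin, PySem.List.enumerate_nil, lettT]
  | succ t ih =>
    intro n k
    have hpad : padBin n (t+1) = padBin (PySem.Int.floordiv n 2) t ++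
        [if PySem.Int.mod n 2 ≠ 0 then '1' else '0'] := rfl
    have hfun : (fun (p : Int × Char) =>
          if p.2 = '1' then some (Char.ofNat ((64 + ((t+1:Nat):Int) + (k:Int)) - p.1).toNat) else none)
        = (fun (p : Int × Char) =>
          if p.2 = '1' then some (Char.ofNat ((64 + (t:Int) + ((k+1:Nat):Int)) - p.1).toNat) else none) := by
      funext p
      have h64 : (64 + ((t+1:Nat):Int) + (k:Int)) = (64 + (t:Int) + ((k+1:Nat):Int)) := by
        push_cast; ring
      rw [h64]
    have hlett : lettT n (t+1) k = lettT (PySem.Int.floordiv n 2) t (k+1) ++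
        (if PySem.Int.mod n 2 ≠ 0 then [Char.ofNat (65 + k)] else []) := rfl
    rw [hpad, PySem.List.enumerate_append, List.filterMap_append, hfun,
        ih (PySem.Int.floordiv n 2) (k+1), hlett]
    congr 1
    rw [PySem.List.enumerate_cons, PySem.List.enumerate_nil, List.filterMap_cons, List.filterMap_nil]
    by_cases hmod : PySem.Int.mod n 2 ≠ 0
    · rw [if_pos hmod, if_pos hmod]
      have hchr : ((64 + (t:Int) + ((k+1:Nat):Int)) - (0 + ((padBin (PySem.Int.floordiv n 2) t).length : Int))).toNat
          = 65 + k := by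
        rw [length_padBin]; push_cast; omega
      show [Char.ofNat (((64 + (t:Int) + ((k+1:Nat):Int)) - (0 + (((padBin (PySem.Int.floordiv n 2) t).length) : Int))).toNat)]
          = [Char.ofNat (65 + k)]
      rw [hchr]
    · rw [if_neg hmod, if_neg hmod]
      simp

theorem blist_zero_case (n : Int) (hz : n = 0) (k : Nat) :
    blist n k = List.replicate ((pyBin n.toNat).length - (25 - k)) 'Z' ++
      lettT n (min (pyBin n.toNat).length (25 - k)) k := by
  subst hz
  rw [blist, if_neg (by omega : ¬ (0:Int) < 0)]
  have hb : pyBin (0:Int).toNat = [] := by rw [pyBin]; simp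
  rw [hb]
  simp [lettT]

theorem blist_eq_padZ (m : Nat) : ∀ (n : Int), 0 ≤ n → n.toNat ≤ m → ∀ (k : Nat),
    blist n k = List.replicate ((pyBin n.toNat).length - (25 - k)) 'Z' ++
      lettT n (min (pyBin n.toNat).length (25 - k)) k := by
  induction m with
  | zero =>
    intro n hn h0 k
    exact blist_zero_case n (by omega) k
  | succ m ih =>
    intro n hn hm k
    by_cases hp : 0 < n
    · have hfd0 : 0 ≤ PySem.Int.floordiv n 2 := fd_nonneg n hp
      have hfdm : (PySem.Int.floordiv n 2).toNat ≤ m := by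
        have := pv_fd_lt n hp; omega
      have ihh := ih (PySem.Int.floordiv n 2) hfd0 hfdm (k+1)
      rw [blist, if_pos hp, ihh, pyBin_succ n hp, List.length_append]
      simp only [List.length_cons, List.length_nil]
      by_cases hk : k < 25
      · have hmin : min ((pyBin (PySem.Int.floordiv n 2).toNat).length + (0+1)) (25 - k)
            = min (pyBin (PySem.Int.floordiv n 2).toNat).length (25 - (k+1)) + 1 := by omega
        have hrep : (pyBin (PySem.Int.floordiv n 2).toNat).length + (0+1) - (25 - k)
            = (pyBin (PySem.Int.floordiv n 2).toNat).length - (25 - (k+1)) := by omega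
        have hlet : lettT n (min (pyBin (PySem.Int.floordiv n 2).toNat).length (25 - (k+1)) + 1) k
            = lettT (PySem.Int.floordiv n 2) (min (pyBin (PySem.Int.floordiv n 2).toNat).length (25 - (k+1))) (k+1) ++
              (if PySem.Int.mod n 2 ≠ 0 then [Char.ofNat (65 + k)] else []) := rfl
        have hent : entryF n k = (if PySem.Int.mod n 2 ≠ 0 then [Char.ofNat (65 + k)] else []) := by
          unfold entryF; rw [if_neg (by omega : ¬ 25 ≤ k)]
        rw [hent, hmin, hrep, hlet, List.append_assoc]
      · have h250 : 25 - k = 0 := by omega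
        have h251 : 25 - (k+1) = 0 := by omega
        have hent : entryF n k = ['Z'] := by
          unfold entryF; rw [if_pos (by omega : 25 ≤ k)]
        rw [hent, h250, h251]
        simp only [Nat.min_zero]
        have hl1 : lettT (PySem.Int.floordiv n 2) 0 (k+1) = [] := rfl
        have hl2 : lettT n 0 k = [] := rfl
        rw [hl1, hl2, List.append_nil, List.append_nil]
        have hc : (pyBin (PySem.Int.floordiv n 2).toNat).length + (0+1) - 0
            = (pyBin (PySem.Int.floordiv n 2).toNat).length + 1 := by omega
        rw [hc, Nat.sub_zero, List.replicate_succ']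
    · exact blist_zero_case n (by omega) k

theorem alt_eq_blist (n : Int) (hn : 0 < n) :
    character_transform_alt n = String.mk (blist n 0) := by
  have hexp : character_transform_alt n = String.mk
      (PySem.List.pyRepeat ['Z'] (max (((pyBin n.toNat).length : Int) - 25) 0) ++
        (PySem.List.enumerate (PySem.List.slice (pyBin n.toNat)
            (some (max (((pyBin n.toNat).length : Int) - 25) 0)) none) 0).filterMap (fun p =>
          if p.2 = '1' then some (Char.ofNat (64 + (((PySem.List.slice (pyBin n.toNat)
            (some (max (((pyBin n.toNat).length : Int) - 25) 0)) none).length) : Int) - p.1).toNat) else none)) := by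
    unfold character_transform_alt
    rw [if_neg (by omega : ¬ n ≤ 0)]
  rw [hexp]
  have hmax : max (((pyBin n.toNat).length : Int) - 25) 0 = (((pyBin n.toNat).length - 25 : Nat) : Int) := by
    omega
  have hL25 : (pyBin n.toNat).length - 25
      = (pyBin n.toNat).length - min (pyBin n.toNat).length 25 := by omega
  have hdrop : (pyBin n.toNat).drop ((pyBin n.toNat).length - 25)
      = padBin n (min (pyBin n.toNat).length 25) := by
    rw [hL25]
    exact drop_pyBin (min (pyBin n.toNat).length 25) n (by omega) (Nat.min_le_left _ _)
  rw [hmax, PySem.List.slice_from_natCast, hdrop, PySem.List.pyRepeat_singleton, length_padBin]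
  have hfun0 : (fun (p : Int × Char) =>
        if p.2 = '1' then some (Char.ofNat ((64 + ((min (pyBin n.toNat).length 25 : Nat) : Int)) - p.1).toNat) else none)
      = (fun (p : Int × Char) =>
        if p.2 = '1' then some (Char.ofNat ((64 + ((min (pyBin n.toNat).length 25 : Nat) : Int) + ((0:Nat) : Int)) - p.1).toNat) else none) := by
    funext p
    norm_num
  rw [hfun0, filterMap_padBin (min (pyBin n.toNat).length 25) n 0]
  rw [blist_eq_padZ n.toNat n (by omega) (le_refl _) 0]
  simp only [Nat.sub_zero, Int.toNat_natCast]

-- ===== VERDICT =====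
theorem character_transform_spec : Claim_equal_character_transform := by
  unfold Claim_equal_character_transform
  intro n _
  unfold Spec_character_transform
  by_cases hn : 0 < n
  · have hA : ctLoop n 65 [] = (blist n 0).reverse := by
      have := ctLoop_eq_blist n.toNat n (le_refl _) 0 []
      simpa using this
    rw [alt_eq_blist n hn]
    unfold character_transform
    rw [hA, List.reverse_reverse]
  · unfold character_transform character_transform_alt
    rw [ctLoop]
    simp [hn, show n ≤ 0 by omega]
    rfl
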